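-- pv_equiv track=rewrite | github.com/blueshiftofdeath/imessage-counter | imessageCounter.py | std_list
-- ===== SOURCE A (Python) =====
-- from itertools import groupby
--
-- def std_list(L):
--     L = groupby(L, key = lambda x: x[0])
--     counts = {}
--     for k,g in L:
--         wordCount = sum(map(lambda x: x[1], g))
--         if k in counts:
--             counts[k] += wordCount
--         else:
--             counts[k] = wordCount
--     return sorted(list(map(lambda k: (k, counts[k]), counts.keys())))
-- ===== SOURCE B (Python) =====
-- from itertools import groupby
--
-- def std_list(L):
--     S = sorted(L, key=lambda x: x[0])
--     return [(k, sum(x[1] for x in g)) for k, g in groupby(S, key=lambda x: x[0])]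
-- ===== Notes on version B (the rewrite author's own statement) =====
-- stated objective: alternative
-- what changed: A aggregates adjacent groupby chunks into a hash dict and then sorts the accumulated (key,total) pairs; B first sorts the input by key, so one groupby pass over the sorted list yields the final sorted (key,total) list directly with no dict and no trailing sort.
import Mathlib
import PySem

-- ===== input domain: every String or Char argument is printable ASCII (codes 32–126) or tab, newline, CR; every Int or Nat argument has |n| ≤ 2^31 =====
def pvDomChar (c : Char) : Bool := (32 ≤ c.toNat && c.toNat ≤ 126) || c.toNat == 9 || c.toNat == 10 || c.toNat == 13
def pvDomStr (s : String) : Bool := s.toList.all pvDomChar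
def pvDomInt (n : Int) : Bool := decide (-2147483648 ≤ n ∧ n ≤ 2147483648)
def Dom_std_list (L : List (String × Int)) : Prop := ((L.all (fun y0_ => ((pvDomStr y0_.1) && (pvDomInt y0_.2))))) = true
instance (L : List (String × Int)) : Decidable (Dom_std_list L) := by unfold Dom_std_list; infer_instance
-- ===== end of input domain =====

-- B replaces A's hash-dict aggregation + final sort of the pairs by sort-the-input-first:
-- one groupby pass over the key-sorted list emits the (key, total) pairs already in order.


-- ===== PORT A =====
-- itertools.groupby(xs, key=lambda x: x[0]): maximal runs of equal keys, in order; both Pythons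
-- consume each group g only through the second components x[1], so a group is kept as (key, values).
def pvGroups (L : List (String × Int)) : List (String × List Int) :=
  match L with
  | [] => []
  | (k, v) :: t =>
    (k, v :: (t.takeWhile (fun p => p.1 == k)).map (fun p => p.2)) ::
      pvGroups (t.dropWhile (fun p => p.1 == k))
termination_by L.length
decreasing_by
  simpa using Nat.lt_succ_of_le (List.length_dropWhile_le (fun p => p.1 == k) t)

-- literal port of A: groupby, accumulate group sums into a dict, then sorted() over the
-- (k, counts[k]) pairs (counts[k] ported as getD k 0, exact because k ranges over counts.keys;
-- sorted() on pairs is Python's lexicographic tuple order = sorted2 on (fst, snd))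
def std_list (L : List (String × Int)) : List (String × Int) :=
  let counts := (pvGroups L).foldl
    (fun d g =>
      let wordCount := g.2.sum
      if d.contains g.1 then d.insert g.1 (d.getD g.1 0 + wordCount)
      else d.insert g.1 wordCount)
    PySem.Dict.empty
  PySem.List.sorted2 (counts.keys.map (fun k => (k, counts.getD k 0)))
    (fun p => p.1) (fun p => p.2) false

-- ===== PORT B =====
-- literal port of B: sort by key, then one groupby pass summing each group's values
def std_list_alt (L : List (String × Int)) : List (String × Int) :=
  let S := PySem.List.sorted L (fun p => p.1) false
  (pvGroups S).map (fun g => (g.1, g.2.sum))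

-- ===== PRECONDITION & SPEC =====
def Spec_std_list (L : List (String × Int)) (out : List (String × Int)) : Prop := out = std_list_alt L
instance (L : List (String × Int)) (out : List (String × Int)) : Decidable (Spec_std_list L out) := by unfold Spec_std_list; infer_instance

-- ===== CLAIM (what is proved, stated in full; the proofs are below) =====
def Claim_equal_std_list : Prop := ∀ (L : List (String × Int)), Dom_std_list L → Spec_std_list L (std_list L)

-- ===== LEMMAS AND PROOFS =====

-- total of the values attached to key k in L
def pvTot (L : List (String × Int)) (k : String) : Int :=
  ((L.filter (fun p => p.1 == k)).map (fun p => p.2)).sum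

-- the element-wise accumulation step A's dict loop reduces to
def pvEstep (d : PySem.Dict String Int) (p : String × Int) : PySem.Dict String Int :=
  d.insert p.1 (d.getD p.1 0 + p.2)

theorem pvEstep_samekey (k : String) (s : List (String × Int))
    (hs : ∀ p ∈ s, p.1 = k) (d : PySem.Dict String Int) (c : Int) :
    s.foldl pvEstep (d.insert k c) = d.insert k (c + (s.map (fun p => p.2)).sum) := by
  induction s generalizing c with
  | nil => simp
  | cons p t ih =>
    have hp : p.1 = k := hs p (by simp)
    have hstep : pvEstep (d.insert k c) p = d.insert k (c + p.2) := by
      simp [pvEstep, hp, PySem.Dict.getD_insert_self, PySem.Dict.insert_insert_self]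
    rw [List.foldl_cons, hstep, ih (fun q hq => hs q (by simp [hq]))]
    rw [List.map_cons, List.sum_cons, add_assoc]

theorem pvEstep_getD (l : List (String × Int)) (d : PySem.Dict String Int) (k : String) :
    (l.foldl pvEstep d).getD k 0 = d.getD k 0 + pvTot l k := by
  induction l generalizing d with
  | nil => simp [pvTot]
  | cons p t ih =>
    rw [List.foldl_cons, ih]
    by_cases h : k = p.1
    · simp [pvEstep, pvTot, PySem.Dict.getD_insert, h, List.filter_cons]
      ring
    · have : (p.1 == k) = false := by simp; exact fun e => h e.symm
      simp [pvEstep, pvTot, PySem.Dict.getD_insert, h, List.filter_cons, this]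

theorem pvEstep_keys (L : List (String × Int)) :
    (L.foldl pvEstep PySem.Dict.empty).keys
      = PySem.Set.ofList (L.map (fun p => p.1)) := by
  have := PySem.Dict.keys_foldl_insert_key (ν := Int) L (fun p => p.1)
    (fun d p => d.getD p.1 0 + p.2) PySem.Dict.empty
  simpa [pvEstep, PySem.Set.update_nil_left] using this

theorem pvGroups_fold_eq (L : List (String × Int)) (d : PySem.Dict String Int) :
    (pvGroups L).foldl
      (fun d g =>
        let wordCount := g.2.sum
        if d.contains g.1 then d.insert g.1 (d.getD g.1 0 + wordCount)
        else d.insert g.1 wordCount) d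
    = L.foldl pvEstep d := by
  induction L using pvGroups.induct generalizing d with
  | case1 => simp [pvGroups]
  | case2 k v t ih =>
    rw [pvGroups, List.foldl_cons]
    have hsplit : (k, v) :: t
        = ((k, v) :: t.takeWhile (fun p => p.1 == k)) ++ t.dropWhile (fun p => p.1 == k) := by
      simp [List.takeWhile_append_dropWhile]
    have hstep : ∀ (wc : Int),
        (if d.contains k then d.insert k (d.getD k 0 + wc) else d.insert k wc)
          = d.insert k (d.getD k 0 + wc) := by
      intro wc
      by_cases h : d.contains k
      · simp [h]
      · rw [Bool.not_eq_true] at h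
        simp [h, PySem.Dict.getD_of_not_contains d (0:Int) h]
    have hsame : ∀ p ∈ t.takeWhile (fun p => p.1 == k), p.1 = k := by
      intro p hp
      have := List.mem_takeWhile_imp hp
      simpa using this
    calc (pvGroups (t.dropWhile (fun p => p.1 == k))).foldl _
          (if d.contains k then d.insert k (d.getD k 0 + (v :: (t.takeWhile (fun p => p.1 == k)).map (fun p => p.2)).sum)
           else d.insert k (v :: (t.takeWhile (fun p => p.1 == k)).map (fun p => p.2)).sum)
        = (t.dropWhile (fun p => p.1 == k)).foldl pvEstep
            (d.insert k (d.getD k 0 + (v :: (t.takeWhile (fun p => p.1 == k)).map (fun p => p.2)).sum)) := by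
          rw [hstep]; exact ih _
      _ = ((k, v) :: t).foldl pvEstep d := by
          conv_rhs => rw [hsplit]
          rw [List.foldl_append, List.foldl_cons]
          have : pvEstep d (k, v) = d.insert k (d.getD k 0 + v) := rfl
          rw [this, pvEstep_samekey k _ hsame, List.sum_cons]
          ring_nf

theorem std_list_char (L : List (String × Int)) :
    std_list L = PySem.List.sorted2
      ((PySem.Set.ofList (L.map (fun p => p.1))).map (fun k => (k, pvTot L k)))
      (fun p => p.1) (fun p => p.2) false := by
  unfold std_list
  rw [pvGroups_fold_eq]
  show PySem.List.sorted2 (List.map _ (List.foldl pvEstep PySem.Dict.empty L).keys) _ _ _ = _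
  rw [pvEstep_keys]
  congr 1
  apply List.map_congr_left
  intro k _
  rw [pvEstep_getD]
  simp [pvTot]

theorem pvInsertBy_congr (f g : (String × Int) → (String × Int) → Bool)
    (x : String × Int) (ys : List (String × Int)) (h : ∀ y ∈ ys, f x y = g x y) :
    PySem.List.insertBy f x ys = PySem.List.insertBy g x ys := by
  induction ys with
  | nil => rfl
  | cons y t ih =>
    rw [PySem.List.insertBy, PySem.List.insertBy, h y (by simp)]
    by_cases hb : g x y = true
    · simp [hb]
    · rw [Bool.not_eq_true] at hb
      simp [hb, ih (fun z hz => h z (by simp [hz]))]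

theorem pvFoldl_insertBy_congr (f g : (String × Int) → (String × Int) → Bool)
    (t acc : List (String × Int))
    (h1 : ∀ z ∈ t, ∀ y ∈ acc, f z y = g z y)
    (h2 : ∀ z ∈ t, ∀ y ∈ t, f z y = g z y) :
    t.foldl (fun acc x => PySem.List.insertBy f x acc) acc
      = t.foldl (fun acc x => PySem.List.insertBy g x acc) acc := by
  induction t generalizing acc with
  | nil => rfl
  | cons x t ih =>
    rw [List.foldl_cons, List.foldl_cons,
      pvInsertBy_congr f g x acc (h1 x (by simp))]
    apply ih
    · intro z hz y hy
      rw [PySem.List.mem_insertBy] at hy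
      rcases hy with rfl | hy
      · exact h2 z (by simp [hz]) y (by simp)
      · exact h1 z (by simp [hz]) y hy
    · intro z hz y hy
      exact h2 z (by simp [hz]) y (by simp [hy])

theorem pvSorted2_eq_sorted (xs : List (String × Int))
    (h : ∀ a ∈ xs, ∀ b ∈ xs, a.1 = b.1 → a = b) :
    PySem.List.sorted2 xs (fun p => p.1) (fun p => p.2) false
      = PySem.List.sorted xs (fun p => p.1) false := by
  rw [PySem.List.sorted2, PySem.List.sorted_eq_foldl_insertBy]
  simp only []
  apply pvFoldl_insertBy_congr
  · intro z _ y hy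
    simp at hy
  · intro z hz y hy
    by_cases he : z.1 = y.1
    · have : z = y := h z hz y hy he
      subst this
      simp
    · rcases lt_or_gt_of_ne he with hlt | hgt
      · simp [hlt]
      · simp [not_lt_of_gt hgt, hgt, le_of_lt hgt]

theorem pvOfList_sublist {α : Type} [BEq α] [LawfulBEq α] (xs : List α) :
    (PySem.Set.ofList xs).Sublist xs := by
  induction xs using List.reverseRecOn with
  | nil => simp [PySem.Set.ofList]
  | append_singleton xs x ih =>
    rw [PySem.Set.ofList_append_singleton, PySem.Set.add_eq_ite]
    by_cases hm : x ∈ PySem.Set.ofList xs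
    · simp only [hm, if_pos]
      exact ih.trans (List.sublist_append_left xs [x])
    · simp only [hm, if_neg, not_false_iff]
      exact ih.append (List.Sublist.refl [x])

theorem pvDiscard_ofList_append_const (k : String) (l1 l2 : List String)
    (h : ∀ x ∈ l1, x = k) :
    PySem.Set.discard (PySem.Set.ofList (l1 ++ l2)) k
      = PySem.Set.discard (PySem.Set.ofList l2) k := by
  induction l1 with
  | nil => rfl
  | cons a t ih =>
    have ha : a = k := h a (by simp)
    subst ha
    rw [List.cons_append, PySem.Set.ofList_cons]
    rw [show ∀ s : PySem.Set String, PySem.Set.discard (a :: s) a = PySem.Set.discard s a from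
      fun s => by simp [PySem.Set.discard]]
    rw [show ∀ s : PySem.Set String, PySem.Set.discard (PySem.Set.discard s a) a = PySem.Set.discard s a from
      fun s => by simp [PySem.Set.discard, List.filter_filter]]
    exact ih (fun x hx => h x (by simp [hx]))

theorem std_list_alt_char (M : List (String × Int))
    (hM : M.Pairwise (fun a b => a.1 ≤ b.1)) :
    (pvGroups M).map (fun g => (g.1, g.2.sum))
      = (PySem.Set.ofList (M.map (fun p => p.1))).map (fun k => (k, pvTot M k)) := by
  induction M using pvGroups.induct with
  | case1 => simp [pvGroups, PySem.Set.ofList]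
  | case2 k v t ih =>
    set s := t.takeWhile (fun p => p.1 == k) with hs
    set r := t.dropWhile (fun p => p.1 == k) with hr
    have htsplit : t = s ++ r := (List.takeWhile_append_dropWhile).symm
    have hsk : ∀ p ∈ s, p.1 = k := by
      intro p hp; simpa using List.mem_takeWhile_imp hp
    -- every key in r is > k
    have hkle : ∀ p ∈ t, k ≤ p.1 := by
      intro p hp
      exact (List.pairwise_cons.mp hM).1 p hp
    have hrt : ∀ p ∈ r, p ∈ t := fun p hp => (List.dropWhile_sublist _).mem hp
    have hrp : r.Pairwise (fun a b => a.1 ≤ b.1) :=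
      (List.Pairwise.sublist (List.dropWhile_sublist _) ((List.pairwise_cons.mp hM).2))
    have hrgt : ∀ p ∈ r, k < p.1 := by
      intro p hp
      match hhr : r with
      | [] => simp [hhr] at hp
      | q :: r' =>
        have hq : (q.1 == k) = false := by
          have := List.head?_dropWhile_not (fun p => p.1 == k) t
          rw [← hr, hhr] at this
          simpa using this
        have hqk : q.1 ≠ k := by simpa using hq
        have hkq : k < q.1 := lt_of_le_of_ne (hkle q (hrt q (by rw [hhr]; simp))) (Ne.symm hqk)
        rw [hhr] at hp
        rcases List.mem_cons.mp hp with rfl | hp'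
        · exact hkq
        · have : q.1 ≤ p.1 := by
            rw [hhr] at hrp
            exact (List.pairwise_cons.mp hrp).1 p hp'
          exact lt_of_lt_of_le hkq this
    have hrne : ∀ p ∈ r, (p.1 == k) = false := by
      intro p hp; simpa using ne_of_gt (hrgt p hp)
    -- key list
    have hkeys : PySem.Set.ofList (((k, v) :: t).map (fun p => p.1))
        = k :: PySem.Set.ofList (r.map (fun p => p.1)) := by
      rw [List.map_cons, PySem.Set.ofList_cons, htsplit, List.map_append]
      rw [pvDiscard_ofList_append_const k _ _ (by
        intro x hx
        rcases List.mem_map.mp hx with ⟨p, hp, rfl⟩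
        exact hsk p hp)]
      rw [show PySem.Set.discard (PySem.Set.ofList (r.map (fun p => p.1))) k
          = PySem.Set.ofList (r.map (fun p => p.1)) from ?_]
      apply List.filter_eq_self.mpr
      intro x hx
      have hx' : x ∈ r.map (fun p => p.1) := (PySem.Set.mem_ofList _ _).mp hx
      rcases List.mem_map.mp hx' with ⟨p, hp, rfl⟩
      simpa using ne_of_gt (hrgt p hp)
    -- totals
    have htotk : pvTot ((k, v) :: t) k = (v :: s.map (fun p => p.2)).sum := by
      unfold pvTot
      rw [htsplit, List.filter_cons, List.filter_append]
      have h1 : s.filter (fun p => p.1 == k) = s := List.filter_eq_self.mpr (by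
        intro p hp; simpa using hsk p hp)
      have h2 : r.filter (fun p => p.1 == k) = [] := List.filter_eq_nil_iff.mpr (by
        intro p hp; simpa using hrne p hp)
      simp [h1, h2]
    have htotr : ∀ k' ∈ PySem.Set.ofList (r.map (fun p => p.1)),
        pvTot ((k, v) :: t) k' = pvTot r k' := by
      intro k' hk'
      have hk'r : k' ∈ r.map (fun p => p.1) := (PySem.Set.mem_ofList _ _).mp hk'
      rcases List.mem_map.mp hk'r with ⟨q, hq, rfl⟩
      have hkne : (k == q.1) = false := by simpa using ne_of_lt (hrgt q hq)
      unfold pvTot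
      rw [htsplit, List.filter_cons, List.filter_append]
      have h1 : s.filter (fun p => p.1 == q.1) = [] := List.filter_eq_nil_iff.mpr (by
        intro p hp
        rw [hsk p hp]
        simpa using (ne_of_lt (hrgt q hq)))
      simp [hkne, h1]
    -- assemble
    rw [pvGroups]
    rw [List.map_cons, hkeys, List.map_cons, ← hs, ← hr]
    congr 1
    · simpa using htotk.symm
    · rw [ih hrp]
      exact (List.map_congr_left (fun k' hk' => by rw [htotr k' hk'])).symm

theorem final (L : List (String × Int)) : std_list L = std_list_alt L := by
  set M := PySem.List.sorted L (fun p => p.1) false with hMdef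
  have hMp : M.Perm L := PySem.List.sorted_perm L (fun p => p.1) false
  have hMpw : M.Pairwise (fun a b => a.1 ≤ b.1) := PySem.List.sorted_pairwise L (fun p => p.1)
  have htot : ∀ k, pvTot M k = pvTot L k := by
    intro k
    exact List.Perm.sum_eq (List.Perm.map _ (List.Perm.filter _ hMp))
  have hB : std_list_alt L
      = (PySem.Set.ofList (M.map (fun p => p.1))).map (fun k => (k, pvTot L k)) := by
    unfold std_list_alt
    rw [← hMdef, std_list_alt_char M hMpw]
    exact List.map_congr_left (fun k _ => by rw [htot])
  have hkeysperm : (PySem.Set.ofList (M.map (fun p => p.1))).Perm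
      (PySem.Set.ofList (L.map (fun p => p.1))) := by
    refine (List.perm_ext_iff_of_nodup (PySem.Set.nodup_ofList _) (PySem.Set.nodup_ofList _)).mpr ?_
    intro a
    rw [PySem.Set.mem_ofList, PySem.Set.mem_ofList]
    exact (hMp.map (fun p => p.1)).mem_iff
  have hkM_lt : (PySem.Set.ofList (M.map (fun p => p.1))).Pairwise (· < ·) := by
    have hsub := pvOfList_sublist (M.map (fun p => p.1))
    have hle : (M.map (fun p => p.1)).Pairwise (· ≤ ·) := List.pairwise_map.mpr hMpw
    have h1 : (PySem.Set.ofList (M.map (fun p => p.1))).Pairwise (· ≤ ·) :=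
      List.Pairwise.sublist hsub hle
    have h2 : (PySem.Set.ofList (M.map (fun p => p.1))).Pairwise (· ≠ ·) :=
      PySem.Set.nodup_ofList _
    exact (h1.and h2).imp (fun h => lt_of_le_of_ne h.1 h.2)
  rw [std_list_char, hB]
  rw [pvSorted2_eq_sorted _ (by
    intro a ha b hb hab
    rcases List.mem_map.mp ha with ⟨ka, _, rfl⟩
    rcases List.mem_map.mp hb with ⟨kb, _, rfl⟩
    simp at hab ⊢
    exact ⟨hab, by rw [hab]⟩)]
  refine PySem.List.sorted_eq_of_perm_of_pairwise_lt _ _ (fun p : String × Int => p.1) ?_ ?_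
  · exact List.Perm.map _ hkeysperm
  · rw [List.pairwise_map]
    exact hkM_lt.imp (fun h => h)


-- ===== VERDICT (by name: the statement is the Claim_ definition above) =====
theorem std_list_spec : Claim_equal_std_list := by
  intro L _
  exact final L
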